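-- pv_equiv track=rewrite | github.com/MotheLavanya/python-tasks | 26.05-2025.py | lower_upper
-- ===== SOURCE A (Python) =====
-- def lower_upper(word):
--     result = ""
--     for i in word:
--         if ord("a") <= ord(i) <= ord("z"):
--             result+=chr(ord(i) - 32)
--         else:
--             result+=i
--     return result
-- ===== SOURCE B (Python) =====
-- def lower_upper(word):
--     table = {c: c - 32 for c in range(ord("a"), ord("z") + 1)}
--     return word.translate(table)
-- ===== Notes on version B (the rewrite author's own statement) =====
-- stated objective: faster
-- what changed: B precomputes a lowercase-to-uppercase translation table and applies it with a single C-level str.translate call, instead of A's per-character Python loop with branching ord/chr arithmetic and repeated string concatenation.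
import Mathlib
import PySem

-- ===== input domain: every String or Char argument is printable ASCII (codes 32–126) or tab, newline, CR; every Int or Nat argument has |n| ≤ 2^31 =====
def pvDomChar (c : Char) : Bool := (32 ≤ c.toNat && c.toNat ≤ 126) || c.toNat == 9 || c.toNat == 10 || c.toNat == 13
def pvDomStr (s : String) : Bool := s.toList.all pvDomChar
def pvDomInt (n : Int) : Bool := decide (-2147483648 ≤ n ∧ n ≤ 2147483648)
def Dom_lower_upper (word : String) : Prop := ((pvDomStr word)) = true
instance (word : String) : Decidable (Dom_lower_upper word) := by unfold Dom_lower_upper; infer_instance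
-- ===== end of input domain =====

-- B replaces A's per-character branch-and-concatenate loop by a precomputed
-- lowercase→uppercase translation table applied with a single str.translate call (idiomatic).

-- ===== PORT A =====
-- result = ""; for i in word: if 'a' <= i <= 'z': result += chr(ord(i)-32) else result += i
def lower_upper (word : String) : String :=
  String.mk (word.toList.foldl
    (fun result i =>
      if 97 ≤ i.toNat ∧ i.toNat ≤ 122 then result ++ [Char.ofNat (i.toNat - 32)]
      else result ++ [i]) [])

-- ===== PORT B =====
-- table = {c: c - 32 for c in range(ord('a'), ord('z')+1)}  (dict comprehension over a range)
def luTable : PySem.Dict Int Int :=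
  (PySem.List.pyRange 97 123 1).foldl (fun d c => d.insert c (c - 32)) PySem.Dict.empty

-- word.translate(table): each char whose code point is a key is replaced by chr(table[ord c]); others kept
def luTranslate (table : PySem.Dict Int Int) (c : Char) : Char :=
  match table.get? (c.toNat : Int) with
  | some v => Char.ofNat v.toNat
  | none => c

def lower_upper_alt (word : String) : String :=
  String.mk (word.toList.map (luTranslate luTable))

-- ===== PRECONDITION & SPEC =====
def Spec_lower_upper (word : String) (out : String) : Prop := out = lower_upper_alt word
instance (word : String) (out : String) : Decidable (Spec_lower_upper word out) := by unfold Spec_lower_upper; infer_instance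

-- ===== CLAIM (what is proved, stated in full; the proofs are below) =====
def Claim_equal_lower_upper : Prop := ∀ (word : String), Dom_lower_upper word → Spec_lower_upper word (lower_upper word)

-- ===== LEMMAS AND PROOFS =====

theorem tbl_get (n : Nat) : ∀ (a k : Int),
    ((PySem.List.pyRange a (a + n) 1).foldl (fun d c => d.insert c (c - 32)) PySem.Dict.empty).get? k
      = if a ≤ k ∧ k < a + n then some (k - 32) else none := by
  induction n with
  | zero =>
    intro a k
    rw [PySem.List.pyRange_one_eq_nil (by omega)]
    rw [if_neg (by omega)]
    rfl
  | succ m ih =>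
    intro a k
    have h : (a : Int) + (m + 1 : Nat) = (a + m) + 1 := by push_cast; ring
    rw [h, PySem.List.pyRange_one_succ_right (by omega), List.foldl_append]
    simp only [List.foldl]
    rw [PySem.Dict.get?_insert, ih a k]
    split_ifs <;> first | rfl | omega | (push_cast at *; omega) | simp_all

theorem luTable_get (k : Int) :
    luTable.get? k = if 97 ≤ k ∧ k < 123 then some (k - 32) else none := by
  have := tbl_get 26 97 k
  norm_num at this
  unfold luTable
  rw [this]

theorem luTranslate_eq (c : Char) :
    luTranslate luTable c =
      (if 97 ≤ c.toNat ∧ c.toNat ≤ 122 then Char.ofNat (c.toNat - 32) else c) := by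
  unfold luTranslate
  rw [luTable_get]
  by_cases hc : 97 ≤ c.toNat ∧ c.toNat ≤ 122
  · rw [if_pos (by omega), if_pos hc]
    have : ((c.toNat : Int) - 32).toNat = c.toNat - 32 := by omega
    simp [this]
  · rw [if_neg (by omega), if_neg hc]

-- ===== VERDICT (by name: the statement is the Claim_ definition above) =====
theorem lower_upper_spec : Claim_equal_lower_upper := by
  intro word _
  unfold Spec_lower_upper lower_upper lower_upper_alt
  have hfun : (fun (result : List Char) (i : Char) =>
      if 97 ≤ i.toNat ∧ i.toNat ≤ 122 then result ++ [Char.ofNat (i.toNat - 32)]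
      else result ++ [i])
      = fun result i => result ++ [if 97 ≤ i.toNat ∧ i.toNat ≤ 122 then Char.ofNat (i.toNat - 32) else i] := by
    funext r i; split <;> rfl
  rw [hfun, PySem.List.foldl_append_singleton_eq_map]
  congr 1
  exact List.map_congr_left (fun c _ => (luTranslate_eq c).symm)
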